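-- pv_equiv track=rewrite | github.com/meghamahaur2-arch/Autonomad | token_validator.py | _is_sequential
-- ===== SOURCE A (Python) =====
-- def _is_sequential(s: str) -> bool:
--     """Check if string is sequential"""
--     if len(s) < 3:
--         return False
--
--     ascending = all(ord(s[i+1]) - ord(s[i]) == 1 for i in range(len(s)-1))
--     if ascending:
--         return True
--
--     descending = all(ord(s[i]) - ord(s[i+1]) == 1 for i in range(len(s)-1))
--     return descending
-- ===== SOURCE B (Python) =====
-- def _is_sequential(s: str) -> bool:
--     """Check if string is sequential"""
--     if len(s) < 3:
--         return False
--     codes = [ord(c) for c in s]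
--     asc_from_first = list(range(codes[0], codes[0] + len(s)))
--     asc_from_last = list(range(codes[-1], codes[-1] + len(s)))
--     return codes == asc_from_first or codes[::-1] == asc_from_last
-- ===== Notes on version B (the rewrite author's own statement) =====
-- stated objective: simpler
-- what changed: Instead of two index-based all() scans over adjacent character differences, B builds the whole expected code-point run with range() anchored at the first (resp. last) character and compares it to the code list by a single equality.
import Mathlib
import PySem

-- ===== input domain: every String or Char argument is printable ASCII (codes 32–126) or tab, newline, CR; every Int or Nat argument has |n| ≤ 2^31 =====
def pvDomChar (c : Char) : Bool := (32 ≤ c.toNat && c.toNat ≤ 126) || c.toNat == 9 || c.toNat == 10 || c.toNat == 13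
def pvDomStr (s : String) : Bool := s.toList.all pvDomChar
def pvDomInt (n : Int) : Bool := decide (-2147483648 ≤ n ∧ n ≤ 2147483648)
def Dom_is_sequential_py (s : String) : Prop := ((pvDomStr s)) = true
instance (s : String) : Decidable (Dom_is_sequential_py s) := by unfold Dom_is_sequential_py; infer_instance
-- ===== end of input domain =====

-- B replaces A's two index-based adjacent-difference all() scans by building the whole
-- expected code-point run (anchored at the first / last character) and one list equality.

-- ===== PORT A =====
-- A: guard len<3, then all(ord(s[i+1])-ord(s[i])==1 for i in range(len(s)-1)), then the
-- descending all(); indices are always in range, so getD is exact for s[i].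
def is_sequential_py (s : String) : Bool :=
  let cs := s.toList
  if cs.length < 3 then false
  else
    let ascending := (List.range (cs.length - 1)).all (fun i =>
      ((cs.getD (i+1) ' ').toNat : Int) - ((cs.getD i ' ').toNat : Int) == 1)
    if ascending then true
    else
      (List.range (cs.length - 1)).all (fun i =>
        ((cs.getD i ' ').toNat : Int) - ((cs.getD (i+1) ' ').toNat : Int) == 1)

-- ===== PORT B =====
-- B: codes = [ord(c) for c in s]; range(codes[0], codes[0]+n) = [codes[0]+i for i in range(n)];
-- codes[-1] = codes.getD (n-1); codes[::-1] = codes.reverse. Indices in range, getD exact.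
def is_sequential_py_alt (s : String) : Bool :=
  if s.toList.length < 3 then false
  else
    let codes : List Int := s.toList.map (fun c => (c.toNat : Int))
    let n := s.toList.length
    let ascFromFirst := (List.range n).map (fun (i : Nat) => codes.getD 0 0 + (i : Int))
    let ascFromLast := (List.range n).map (fun (i : Nat) => codes.getD (n-1) 0 + (i : Int))
    (codes == ascFromFirst) || (codes.reverse == ascFromLast)

-- ===== PRECONDITION & SPEC =====
def Spec_is_sequential_py (s : String) (out : Bool) : Prop := out = is_sequential_py_alt s
instance (s : String) (out : Bool) : Decidable (Spec_is_sequential_py s out) := by unfold Spec_is_sequential_py; infer_instance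

-- ===== CLAIM (what is proved, stated in full; the proofs are below) =====
def Claim_equal_is_sequential_py : Prop := ∀ (s : String), Dom_is_sequential_py s → Spec_is_sequential_py s (is_sequential_py s)

-- ===== LEMMAS AND PROOFS =====

-- adjacent +1 steps ↔ the i-th entry is head + i
lemma step_iff_affine (l : List Int) :
    (∀ i < l.length - 1, l.getD (i+1) 0 - l.getD i 0 = 1) ↔
    (∀ i < l.length, l.getD i 0 = l.getD 0 0 + i) := by
  constructor
  · intro h i hi
    induction i with
    | zero => simp
    | succ k ih =>
        have hk : k < l.length - 1 := by omega
        have h1 := h k hk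
        have h2 := ih (by omega)
        push_cast
        push_cast at h2
        omega
  · intro h i hi
    have h1 := h i (by omega)
    have h2 := h (i+1) (by omega)
    push_cast at h1 h2
    omega

-- pointwise affine ↔ equality with the generated run
lemma affine_iff_eq_map (l : List Int) :
    (∀ i < l.length, l.getD i 0 = l.getD 0 0 + i) ↔
    l = (List.range l.length).map (fun (i : Nat) => l.getD 0 0 + (i : Int)) := by
  constructor
  · intro h
    apply List.ext_getElem
    · rw [List.length_map, List.length_range]
    · intro i h1 h2
      rw [List.getElem_map, List.getElem_range]
      have := h i h1
      rwa [List.getD_eq_getElem _ _ h1] at this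
  · intro h i hi
    calc l.getD i 0
        = ((List.range l.length).map (fun (i : Nat) => l.getD 0 0 + (i : Int))).getD i 0 := by
          conv_lhs => rw [h]
      _ = l.getD 0 0 + (i : Int) := by
          rw [List.getD_eq_getElem _ _ (by rw [List.length_map, List.length_range]; exact hi)]
          rw [List.getElem_map, List.getElem_range]

lemma rev_getD (l : List Int) (i : Nat) (hi : i < l.length) :
    l.reverse.getD i 0 = l.getD (l.length - 1 - i) 0 := by
  rw [List.getD_eq_getElem _ _ (by simpa using hi),
      List.getD_eq_getElem _ _ (by omega), List.getElem_reverse]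

-- descending steps on l ↔ ascending steps on l.reverse
lemma desc_iff_rev_asc (l : List Int) :
    (∀ i < l.length - 1, l.getD i 0 - l.getD (i+1) 0 = 1) ↔
    (∀ i < l.reverse.length - 1, l.reverse.getD (i+1) 0 - l.reverse.getD i 0 = 1) := by
  constructor
  · intro h i hi
    rw [List.length_reverse] at hi
    rw [rev_getD _ _ (by omega), rev_getD _ _ (by omega)]
    have h2 := h (l.length - 1 - (i+1)) (by omega)
    have heq : l.length - 1 - i = l.length - 1 - (i+1) + 1 := by omega
    rw [heq]
    omega
  · intro h i hi
    have h2 := h (l.length - 1 - (i+1)) (by rw [List.length_reverse]; omega)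
    rw [rev_getD _ _ (by omega), rev_getD _ _ (by omega)] at h2
    have e1 : l.length - 1 - (l.length - 1 - (i+1) + 1) = i := by omega
    have e2 : l.length - 1 - (l.length - 1 - (i+1)) = i + 1 := by omega
    rw [e1, e2] at h2
    omega

lemma reverse_head (l : List Int) (h : l ≠ []) :
    l.reverse.getD 0 0 = l.getD (l.length - 1) 0 := by
  have hp : 0 < l.length := List.length_pos_of_ne_nil h
  rw [rev_getD _ _ hp, Nat.sub_zero]

-- A's ascending all-scan equals equality with the run anchored at the head
lemma asc_scan_eq (l : List Int) :
    ((List.range (l.length - 1)).all (fun i => l.getD (i+1) 0 - l.getD i 0 == 1)) =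
    (l == (List.range l.length).map (fun (i : Nat) => l.getD 0 0 + (i : Int))) := by
  rw [Bool.eq_iff_iff]
  simp only [List.all_eq_true, List.mem_range, beq_iff_eq]
  rw [step_iff_affine, affine_iff_eq_map]

-- A's descending all-scan equals equality of the reversed list with the run anchored at the last entry
lemma desc_scan_eq (l : List Int) :
    ((List.range (l.length - 1)).all (fun i => l.getD i 0 - l.getD (i+1) 0 == 1)) =
    (l.reverse == (List.range l.length).map (fun (i : Nat) => l.getD (l.length - 1) 0 + (i : Int))) := by
  rcases eq_or_ne l [] with rfl | hne
  · simp
  rw [Bool.eq_iff_iff]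
  simp only [List.all_eq_true, List.mem_range, beq_iff_eq]
  rw [desc_iff_rev_asc]
  rw [(step_iff_affine l.reverse).trans (affine_iff_eq_map l.reverse)]
  rw [reverse_head l hne, List.length_reverse]

-- bridge: code-list getD equals A's char-level getD
lemma map_getD (cs : List Char) (i : Nat) (hi : i < cs.length) :
    (cs.map (fun c => (c.toNat : Int))).getD i 0 = ((cs.getD i ' ').toNat : Int) := by
  rw [List.getD_eq_getElem _ _ (by simpa using hi), List.getD_eq_getElem _ _ hi, List.getElem_map]

lemma all_congr' (n : Nat) (f g : Nat → Bool) (h : ∀ i < n, f i = g i) :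
    (List.range n).all f = (List.range n).all g := by
  rw [Bool.eq_iff_iff]
  simp only [List.all_eq_true, List.mem_range]
  constructor <;> intro H i hi
  · rw [← h i hi]; exact H i hi
  · rw [h i hi]; exact H i hi

-- ===== VERDICT (by name: the statement is the Claim_ definition above) =====
theorem is_sequential_py_spec : Claim_equal_is_sequential_py := by
  intro s _
  show is_sequential_py s = is_sequential_py_alt s
  simp only [is_sequential_py, is_sequential_py_alt]
  by_cases h3 : s.toList.length < 3
  · rw [if_pos h3, if_pos h3]
  · rw [if_neg h3, if_neg h3]
    have hlen : (s.toList.map (fun c => (c.toNat : Int))).length = s.toList.length :=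
      List.length_map ..
    have e1 : ((List.range (s.toList.length - 1)).all (fun i =>
        ((s.toList.getD (i+1) ' ').toNat : Int) - ((s.toList.getD i ' ').toNat : Int) == 1))
        = ((s.toList.map (fun c => (c.toNat : Int))) == (List.range s.toList.length).map
            (fun (i : Nat) => (s.toList.map (fun c => (c.toNat : Int))).getD 0 0 + (i : Int))) := by
      have h := asc_scan_eq (s.toList.map (fun c => (c.toNat : Int)))
      rw [hlen] at h
      rw [← h]
      apply all_congr'
      intro i hi
      rw [map_getD _ _ (by omega), map_getD _ _ (by omega)]
    have e2 : ((List.range (s.toList.length - 1)).all (fun i =>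
        ((s.toList.getD i ' ').toNat : Int) - ((s.toList.getD (i+1) ' ').toNat : Int) == 1))
        = ((s.toList.map (fun c => (c.toNat : Int))).reverse == (List.range s.toList.length).map
            (fun (i : Nat) => (s.toList.map (fun c => (c.toNat : Int))).getD (s.toList.length - 1) 0 + (i : Int))) := by
      have h := desc_scan_eq (s.toList.map (fun c => (c.toNat : Int)))
      rw [hlen] at h
      rw [← h]
      apply all_congr'
      intro i hi
      rw [map_getD _ _ (by omega), map_getD _ _ (by omega)]
    rw [e1, e2]
    split
    · next h => rw [h, Bool.true_or]
    · next h =>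
        rw [Bool.not_eq_true] at h
        rw [h, Bool.false_or]
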